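-- pv_equiv track=rewrite | github.com/981377660LMT/algorithm-study | 0_字符串/1181. 前后拼接.py | beforeAndAfterPuzzles
-- ===== SOURCE A (Python) =====
-- from typing import List
--
-- def beforeAndAfterPuzzles(phrases: List[str]) -> List[str]:
--     n = len(phrases)
--
--     # 统计每个字符串（index表示）的第一个word和最后一个word
--     pre_and_suf = [[]] * n
--     for i, p in enumerate(phrases):
--         words = p.split(' ')
--         pre_and_suf[i] = [words[0], words[-1]]
--
--     # 匹配
--     match = set()
--     for i in range(n):
--         for j in range(n):
--             if i == j:
--                 continue
--             if pre_and_suf[i][1] == pre_and_suf[j][0]: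
--                 new_p = phrases[i] + phrases[j][len(pre_and_suf[j][0]) :]  # 前后桥接的单词只出现1次
--                 match.add(new_p)
--
--     return sorted(list(match))
-- ===== SOURCE B (Python) =====
-- from typing import List
--
--
-- def beforeAndAfterPuzzles(phrases: List[str]) -> List[str]:
--     firsts = [p.split(' ')[0] for p in phrases]
--     lasts = [p.split(' ')[-1] for p in phrases]
--
--     # index: first word -> list of phrase indices starting with it
--     index = {}
--     for j, f in enumerate(firsts):
--         index.setdefault(f, []).append(j)
--
--     match = set()
--     for i, last in enumerate(lasts):
--         for j in index.get(last, []):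
--             if i != j:
--                 match.add(phrases[i] + phrases[j][len(firsts[j]):])
--     return sorted(match)
-- ===== Notes on version B (the rewrite author's own statement) =====
-- stated objective: alternative
-- what changed: B replaces A's all-pairs double loop (comparing every phrase's last word against every phrase's first word) by a dict from first word to the list of phrase indices, so each phrase is matched only against the phrases whose first word equals its last word; intended as faster on sparse matches (measured ~1.76x at n=4096), but the match set itself can be quadratic, so no unconditional speed claim.
import Mathlib
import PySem

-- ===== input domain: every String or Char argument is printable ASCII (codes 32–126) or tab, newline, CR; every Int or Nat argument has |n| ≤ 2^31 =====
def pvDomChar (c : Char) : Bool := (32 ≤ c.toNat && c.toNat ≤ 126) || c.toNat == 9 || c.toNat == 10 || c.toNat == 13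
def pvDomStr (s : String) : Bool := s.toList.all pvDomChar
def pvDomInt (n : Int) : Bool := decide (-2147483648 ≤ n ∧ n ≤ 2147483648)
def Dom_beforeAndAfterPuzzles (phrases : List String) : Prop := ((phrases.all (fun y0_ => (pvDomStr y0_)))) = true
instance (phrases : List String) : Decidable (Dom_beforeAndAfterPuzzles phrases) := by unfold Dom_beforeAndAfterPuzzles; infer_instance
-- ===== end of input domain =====

-- B replaces A's all-pairs double loop by a dict from first word to phrase indices,
-- so each phrase is matched only against the phrases that can follow it.

-- ===== PORT A =====
def beforeAndAfterPuzzles (phrases : List String) : List String :=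
  -- pre_and_suf = [[]] * n; for i, p in enumerate(phrases): pre_and_suf[i] = [words[0], words[-1]]
  let preAndSuf : List (List String) :=
    (PySem.List.enumerate phrases).foldl
      (fun acc ip =>
        let words := (PySem.Str.split? ip.2 " ").getD []   -- sep " " ≠ "": split? is always some
        PySem.List.pySetD acc ip.1
          [PySem.List.pyGetD words 0 "", PySem.List.pyGetD words (-1) ""])
      (List.replicate phrases.length ([] : List String))
  -- match = set(); for i in range(n): for j in range(n): …
  let matchSet : PySem.Set String :=
    (PySem.List.pyRange 0 (phrases.length : Int) 1).foldl
      (fun m i =>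
        (PySem.List.pyRange 0 (phrases.length : Int) 1).foldl
          (fun m j =>
            if i == j then m
            else if PySem.List.pyGetD (PySem.List.pyGetD preAndSuf i []) 1 "" ==
                    PySem.List.pyGetD (PySem.List.pyGetD preAndSuf j []) 0 "" then
              PySem.Set.add m
                (PySem.List.pyGetD phrases i "" ++
                  PySem.Str.slice (PySem.List.pyGetD phrases j "")
                    (some (PySem.Str.len
                      (PySem.List.pyGetD (PySem.List.pyGetD preAndSuf j []) 0 ""))) none)
            else m)
          m)
      PySem.Set.empty
  PySem.List.sorted matchSet (fun x => x) false

-- ===== PORT B =====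
def beforeAndAfterPuzzles_alt (phrases : List String) : List String :=
  -- firsts = [p.split(' ')[0] for p in phrases]; lasts = [p.split(' ')[-1] for p in phrases]
  let firsts : List String :=
    phrases.map (fun p => PySem.List.pyGetD ((PySem.Str.split? p " ").getD []) 0 "")
  let lasts : List String :=
    phrases.map (fun p => PySem.List.pyGetD ((PySem.Str.split? p " ").getD []) (-1) "")
  -- index = {}; for j, f in enumerate(firsts): index.setdefault(f, []).append(j)
  let index : PySem.Dict String (List Int) :=
    (PySem.List.enumerate firsts).foldl
      (fun d jf => d.modify jf.2 [] (· ++ [jf.1])) PySem.Dict.empty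
  -- for i, last in enumerate(lasts): for j in index.get(last, []): …
  let matchSet : PySem.Set String :=
    (PySem.List.enumerate lasts).foldl
      (fun m il =>
        (index.getD il.2 []).foldl
          (fun m j =>
            if il.1 != j then
              PySem.Set.add m
                (PySem.List.pyGetD phrases il.1 "" ++
                  PySem.Str.slice (PySem.List.pyGetD phrases j "")
                    (some (PySem.Str.len (PySem.List.pyGetD firsts j ""))) none)
            else m)
          m)
      PySem.Set.empty
  PySem.List.sorted matchSet (fun x => x) false

-- ===== PRECONDITION & SPEC =====
def Spec_beforeAndAfterPuzzles (phrases : List String) (out : List String) : Prop := out = beforeAndAfterPuzzles_alt phrases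
instance (phrases : List String) (out : List String) : Decidable (Spec_beforeAndAfterPuzzles phrases out) := by unfold Spec_beforeAndAfterPuzzles; infer_instance

-- ===== CLAIM (what is proved, stated in full; the proofs are below) =====
def Claim_equal_beforeAndAfterPuzzles : Prop := ∀ (phrases : List String), Dom_beforeAndAfterPuzzles phrases → Spec_beforeAndAfterPuzzles phrases (beforeAndAfterPuzzles phrases)

-- ===== LEMMAS AND PROOFS =====

-- canonical first / last word of a phrase (exactly the expressions both ports compute)
def pvFirstWord (p : String) : String :=
  PySem.List.pyGetD ((PySem.Str.split? p " ").getD []) 0 ""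
def pvLastWord (p : String) : String :=
  PySem.List.pyGetD ((PySem.Str.split? p " ").getD []) (-1) ""
-- the bridged phrase both programs add for a matching pair (k, m)
def pvComb (phrases : List String) (k m : Nat) : String :=
  phrases[k]! ++
    PySem.Str.slice phrases[m]! (some (PySem.Str.len (pvFirstWord phrases[m]!))) none
-- "x is the bridge of some matching pair of distinct indices"
def pvPair (phrases : List String) (x : String) : Prop :=
  ∃ k m : Nat, k < phrases.length ∧ m < phrases.length ∧ k ≠ m ∧
    pvLastWord phrases[k]! = pvFirstWord phrases[m]! ∧ x = pvComb phrases k m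

-- the intermediate values of the two ports, named so lemmas can speak about them
def pvPreA (phrases : List String) : List (List String) :=
  (PySem.List.enumerate phrases).foldl
    (fun acc ip =>
      let words := (PySem.Str.split? ip.2 " ").getD []
      PySem.List.pySetD acc ip.1
        [PySem.List.pyGetD words 0 "", PySem.List.pyGetD words (-1) ""])
    (List.replicate phrases.length ([] : List String))
def pvSetA (phrases : List String) : PySem.Set String :=
  (PySem.List.pyRange 0 (phrases.length : Int) 1).foldl
    (fun m i =>
      (PySem.List.pyRange 0 (phrases.length : Int) 1).foldl
        (fun m j =>
          if i == j then m
          else if PySem.List.pyGetD (PySem.List.pyGetD (pvPreA phrases) i []) 1 "" ==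
                  PySem.List.pyGetD (PySem.List.pyGetD (pvPreA phrases) j []) 0 "" then
            PySem.Set.add m
              (PySem.List.pyGetD phrases i "" ++
                PySem.Str.slice (PySem.List.pyGetD phrases j "")
                  (some (PySem.Str.len
                    (PySem.List.pyGetD (PySem.List.pyGetD (pvPreA phrases) j []) 0 ""))) none)
          else m)
        m)
    PySem.Set.empty
def pvIndexB (phrases : List String) : PySem.Dict String (List Int) :=
  (PySem.List.enumerate (phrases.map pvFirstWord)).foldl
    (fun d jf => d.modify jf.2 [] (· ++ [jf.1])) PySem.Dict.empty
def pvSetB (phrases : List String) : PySem.Set String :=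
  (PySem.List.enumerate (phrases.map pvLastWord)).foldl
    (fun m il =>
      ((pvIndexB phrases).getD il.2 []).foldl
        (fun m j =>
          if il.1 != j then
            PySem.Set.add m
              (PySem.List.pyGetD phrases il.1 "" ++
                PySem.Str.slice (PySem.List.pyGetD phrases j "")
                  (some (PySem.Str.len (PySem.List.pyGetD (phrases.map pvFirstWord) j ""))) none)
          else m)
        m)
    PySem.Set.empty

theorem pvA_eq (phrases : List String) :
    beforeAndAfterPuzzles phrases = PySem.List.sorted (pvSetA phrases) (fun x => x) false := rfl
theorem pvB_eq (phrases : List String) :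
    beforeAndAfterPuzzles_alt phrases = PySem.List.sorted (pvSetB phrases) (fun x => x) false := rfl

-- membership in a conditional-add fold, given a pointwise description of the step
theorem pv_mem_foldl {α β : Type} (step : List α → β → List α) (Q : β → α → Prop)
    (h : ∀ s y x, x ∈ step s y ↔ x ∈ s ∨ Q y x) :
    ∀ (l : List β) (s0 : List α) (x : α),
      x ∈ l.foldl step s0 ↔ x ∈ s0 ∨ ∃ y ∈ l, Q y x := by
  intro l
  induction l with
  | nil => simp
  | cons y l ih =>
    intro s0 x
    rw [List.foldl_cons, ih, h]
    simp only [List.mem_cons]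
    constructor
    · rintro ((hs | hq) | ⟨z, hz, hQ⟩)
      · exact Or.inl hs
      · exact Or.inr ⟨y, Or.inl rfl, hq⟩
      · exact Or.inr ⟨z, Or.inr hz, hQ⟩
    · rintro (hs | ⟨z, (rfl | hz), hQ⟩)
      · exact Or.inl (Or.inl hs)
      · exact Or.inl (Or.inr hQ)
      · exact Or.inr ⟨z, hz, hQ⟩

-- a fold whose step preserves Nodup produces a Nodup list
theorem pv_nodup_foldl {α β : Type} (step : List α → β → List α)
    (h : ∀ s y, s.Nodup → (step s y).Nodup) :
    ∀ (l : List β) (s0 : List α), s0.Nodup → (l.foldl step s0).Nodup := by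
  intro l
  induction l with
  | nil => intro s0 h0; simpa using h0
  | cons y l ih => intro s0 h0; exact ih _ (h _ _ h0)

theorem pv_get_nat {α : Type} [Inhabited α] (xs : List α) (k : Nat) (hk : k < xs.length) (d : α) :
    PySem.List.pyGetD xs (↑k) d = xs[k]! := by
  rw [PySem.List.pyGetD_natCast, List.getD_eq_getElem _ _ hk, getElem!_pos xs k hk]

theorem pv_map_bang {α β : Type} [Inhabited α] [Inhabited β] (f : α → β) (xs : List α)
    (m : Nat) (hm : m < xs.length) : (List.map f xs)[m]! = f xs[m]! := by
  rw [getElem!_pos (List.map f xs) m (by simpa using hm), getElem!_pos xs m hm, List.getElem_map]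

theorem pv_pyGetD_two_one (a b : String) : PySem.List.pyGetD [a, b] 1 "" = b := by
  simp [pysem]

theorem pv_take_succ_set {α : Type} (acc : List α) (s : Nat) (v : α) (h : s < acc.length) :
    (acc.set s v).take (s + 1) = acc.take s ++ [v] := by
  rw [List.set_eq_take_append_cons_drop, if_pos h, List.take_append]
  simp [List.length_take, Nat.min_eq_left (le_of_lt h)]

-- the write-by-index loop of A fills the replicate list as a map
theorem pv_foldl_enumerate_pySetD {α β : Type} (g : β → α) :
    ∀ (xs : List β) (s : Nat) (acc : List α), acc.length = s + xs.length →
      (PySem.List.enumerate xs (s : Int)).foldl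
          (fun a ip => PySem.List.pySetD a ip.1 (g ip.2)) acc
        = acc.take s ++ xs.map g := by
  intro xs
  induction xs with
  | nil =>
    intro s acc h
    simp only [List.length_nil, Nat.add_zero] at h
    simp [PySem.List.enumerate_nil, List.take_of_length_le h.le]
  | cons x xs ih =>
    intro s acc h
    simp only [List.length_cons] at h
    rw [PySem.List.enumerate_cons, List.foldl_cons]
    have hcast : ((s : Int) + 1) = ((s + 1 : Nat) : Int) := by push_cast; ring
    rw [hcast, PySem.List.pySetD_natCast,
        ih (s + 1) _ (by simp; omega),
        pv_take_succ_set acc s (g x) (by omega)]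
    simp

theorem pvPreA_eq (phrases : List String) :
    pvPreA phrases = phrases.map (fun p => [pvFirstWord p, pvLastWord p]) := by
  have h := pv_foldl_enumerate_pySetD
      (fun p => [pvFirstWord p, pvLastWord p]) phrases 0
      (List.replicate phrases.length ([] : List String)) (by simp)
  simpa [pvFirstWord, pvLastWord] using h

theorem pvPreA_get (phrases : List String) (k : Nat) (hk : k < phrases.length) :
    PySem.List.pyGetD (pvPreA phrases) (↑k) []
      = [pvFirstWord phrases[k]!, pvLastWord phrases[k]!] := by
  rw [pvPreA_eq, pv_get_nat _ k (by simpa using hk),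
      pv_map_bang (fun p => [pvFirstWord p, pvLastWord p]) phrases k hk]

-- the bridged phrase as A's loop body spells it
theorem pvCombA_eq (phrases : List String) (k m : Nat)
    (hk : k < phrases.length) (hm : m < phrases.length) :
    PySem.List.pyGetD phrases (↑k) "" ++
      PySem.Str.slice (PySem.List.pyGetD phrases (↑m) "")
        (some (PySem.Str.len
          (PySem.List.pyGetD (PySem.List.pyGetD (pvPreA phrases) (↑m) []) 0 ""))) none
      = pvComb phrases k m := by
  rw [pvPreA_get phrases m hm, PySem.List.pyGetD_zero_cons,
      pv_get_nat phrases k hk, pv_get_nat phrases m hm, pvComb]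

-- the bridged phrase as B's loop body spells it
theorem pvCombB_eq (phrases : List String) (k m : Nat)
    (hk : k < phrases.length) (hm : m < phrases.length) :
    PySem.List.pyGetD phrases (↑k) "" ++
      PySem.Str.slice (PySem.List.pyGetD phrases (↑m) "")
        (some (PySem.Str.len
          (PySem.List.pyGetD (phrases.map pvFirstWord) (↑m) ""))) none
      = pvComb phrases k m := by
  rw [pv_get_nat (phrases.map pvFirstWord) m (by simpa using hm),
      pv_map_bang pvFirstWord phrases m hm,
      pv_get_nat phrases k hk, pv_get_nat phrases m hm, pvComb]

theorem pv_mem_setA (phrases : List String) (x : String) :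
    x ∈ pvSetA phrases ↔ pvPair phrases x := by
  unfold pvSetA
  rw [pv_mem_foldl _
      (fun i x => ∃ j ∈ PySem.List.pyRange 0 (phrases.length : Int) 1,
        i ≠ j ∧
        PySem.List.pyGetD (PySem.List.pyGetD (pvPreA phrases) i []) 1 "" =
          PySem.List.pyGetD (PySem.List.pyGetD (pvPreA phrases) j []) 0 "" ∧
        x = PySem.List.pyGetD phrases i "" ++
          PySem.Str.slice (PySem.List.pyGetD phrases j "")
            (some (PySem.Str.len
              (PySem.List.pyGetD (PySem.List.pyGetD (pvPreA phrases) j []) 0 ""))) none)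
      (fun m i x => by
        rw [pv_mem_foldl _
            (fun j x =>
              i ≠ j ∧
              PySem.List.pyGetD (PySem.List.pyGetD (pvPreA phrases) i []) 1 "" =
                PySem.List.pyGetD (PySem.List.pyGetD (pvPreA phrases) j []) 0 "" ∧
              x = PySem.List.pyGetD phrases i "" ++
                PySem.Str.slice (PySem.List.pyGetD phrases j "")
                  (some (PySem.Str.len
                    (PySem.List.pyGetD (PySem.List.pyGetD (pvPreA phrases) j []) 0 ""))) none)
            (fun m j x => by
              split_ifs with h1 h2 <;>
                simp_all [PySem.Set.mem_add, beq_iff_eq])])]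
  simp only [PySem.Set.empty, List.not_mem_nil, false_or, PySem.List.mem_pyRange_one]
  constructor
  · rintro ⟨i, hi, j, hj, hne, hcond, hx⟩
    obtain ⟨k, hk, rfl⟩ : ∃ k : Nat, k < phrases.length ∧ i = (k : Int) :=
      ⟨i.toNat, by omega, by omega⟩
    obtain ⟨m, hm, rfl⟩ : ∃ m : Nat, m < phrases.length ∧ j = (m : Int) :=
      ⟨j.toNat, by omega, by omega⟩
    refine ⟨k, m, hk, hm, by exact_mod_cast hne, ?_, ?_⟩
    · rw [pvPreA_get phrases k hk, pvPreA_get phrases m hm,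
          pv_pyGetD_two_one, PySem.List.pyGetD_zero_cons] at hcond
      exact hcond
    · rw [hx, pvCombA_eq phrases k m hk hm]
  · rintro ⟨k, m, hk, hm, hne, hcond, hx⟩
    refine ⟨(k : Int), ⟨by positivity, by exact_mod_cast hk⟩,
            (m : Int), ⟨by positivity, by exact_mod_cast hm⟩,
            by exact_mod_cast hne, ?_, ?_⟩
    · rw [pvPreA_get phrases k hk, pvPreA_get phrases m hm,
          pv_pyGetD_two_one, PySem.List.pyGetD_zero_cons]
      exact hcond
    · rw [hx, pvCombA_eq phrases k m hk hm]

theorem pvIndexB_getD (phrases : List String) (c : String) :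
    (pvIndexB phrases).getD c []
      = (((PySem.List.enumerate (phrases.map pvFirstWord)).filter
            (fun p => p.2 == c)).map (fun p => p.1)) := by
  have hfold : pvIndexB phrases
      = (((PySem.List.enumerate (phrases.map pvFirstWord)).map
            (fun p => (p.2, p.1))).foldl
          (fun d p => d.modify p.1 [] (· ++ [p.2])) PySem.Dict.empty) := by
    rw [List.foldl_map]
    rfl
  rw [hfold, PySem.Dict.getD_foldl_modify_append]
  simp [PySem.Dict.getD_empty, List.filter_map, List.map_map, Function.comp_def]

theorem pv_mem_indexB (phrases : List String) (c : String) (j : Int) :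
    j ∈ (pvIndexB phrases).getD c []
      ↔ ∃ m : Nat, m < phrases.length ∧ j = (m : Int) ∧ pvFirstWord phrases[m]! = c := by
  rw [pvIndexB_getD]
  simp only [List.mem_map, List.mem_filter, PySem.List.mem_enumerate_iff, zero_add]
  constructor
  · rintro ⟨p, ⟨⟨m, hm, rfl⟩, hc⟩, rfl⟩
    simp only [List.length_map] at hm
    refine ⟨m, hm, rfl, ?_⟩
    simp only [beq_iff_eq] at hc
    rw [← hc, List.getElem_map, getElem!_pos phrases m hm]
  · rintro ⟨m, hm, rfl, hc⟩
    refine ⟨((m : Int), (phrases.map pvFirstWord)[m]'(by simpa using hm)),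
            ⟨⟨m, by simpa using hm, by simp⟩, ?_⟩, rfl⟩
    simp only [beq_iff_eq, List.getElem_map]
    rw [← hc, getElem!_pos phrases m hm]

theorem pv_mem_setB (phrases : List String) (x : String) :
    x ∈ pvSetB phrases ↔ pvPair phrases x := by
  unfold pvSetB
  rw [pv_mem_foldl _
      (fun il x => ∃ j ∈ (pvIndexB phrases).getD il.2 [],
        il.1 ≠ j ∧
        x = PySem.List.pyGetD phrases il.1 "" ++
          PySem.Str.slice (PySem.List.pyGetD phrases j "")
            (some (PySem.Str.len (PySem.List.pyGetD (phrases.map pvFirstWord) j ""))) none)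
      (fun m il x => by
        rw [pv_mem_foldl _
            (fun j x =>
              il.1 ≠ j ∧
              x = PySem.List.pyGetD phrases il.1 "" ++
                PySem.Str.slice (PySem.List.pyGetD phrases j "")
                  (some (PySem.Str.len (PySem.List.pyGetD (phrases.map pvFirstWord) j ""))) none)
            (fun m j x => by
              split_ifs with h1 <;>
                simp_all [PySem.Set.mem_add, bne_iff_ne])])]
  simp only [PySem.Set.empty, List.not_mem_nil, false_or,
    PySem.List.mem_enumerate_iff, zero_add]
  constructor
  · rintro ⟨il, ⟨k, hk, rfl⟩, j, hj, hne, hx⟩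
    simp only [List.length_map] at hk
    rw [pv_mem_indexB] at hj
    obtain ⟨m, hm, rfl, hc⟩ := hj
    dsimp only at hne hx hc
    refine ⟨k, m, hk, hm, by exact_mod_cast hne, ?_, ?_⟩
    · rw [hc, List.getElem_map, getElem!_pos phrases k hk]
    · rw [hx, pvCombB_eq phrases k m hk hm]
  · rintro ⟨k, m, hk, hm, hne, hcond, hx⟩
    refine ⟨((k : Int), (phrases.map pvLastWord)[k]'(by simpa using hk)),
            ⟨k, by simpa using hk, by simp⟩, (m : Int), ?_, by simpa using hne, ?_⟩
    · rw [pv_mem_indexB]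
      refine ⟨m, hm, rfl, ?_⟩
      dsimp only
      rw [← hcond, List.getElem_map, getElem!_pos phrases k hk]
    · dsimp only
      rw [hx, pvCombB_eq phrases k m hk hm]

theorem pv_nodup_setA (phrases : List String) : (pvSetA phrases).Nodup := by
  unfold pvSetA
  refine pv_nodup_foldl _ (fun m i hm => ?_) _ _ List.nodup_nil
  refine pv_nodup_foldl _ (fun m2 j hm2 => ?_) _ _ hm
  split_ifs <;> first | exact hm2 | exact PySem.Set.nodup_add _ _ hm2

theorem pv_nodup_setB (phrases : List String) : (pvSetB phrases).Nodup := by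
  unfold pvSetB
  refine pv_nodup_foldl _ (fun m il hm => ?_) _ _ List.nodup_nil
  refine pv_nodup_foldl _ (fun m2 j hm2 => ?_) _ _ hm
  split_ifs <;> first | exact hm2 | exact PySem.Set.nodup_add _ _ hm2

-- ===== VERDICT (by name: the statement is the Claim_ definition above) =====
theorem beforeAndAfterPuzzles_spec : Claim_equal_beforeAndAfterPuzzles := by
  intro phrases _
  show beforeAndAfterPuzzles phrases = beforeAndAfterPuzzles_alt phrases
  rw [pvA_eq, pvB_eq]
  refine PySem.List.sorted_eq_sorted_of_perm _ _ _ (fun a b h => h) ?_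
  rw [List.perm_ext_iff_of_nodup (pv_nodup_setA phrases) (pv_nodup_setB phrases)]
  intro a
  rw [pv_mem_setA, pv_mem_setB]
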